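-- pv_equiv track=rewrite | github.com/qeedquan/challenges | codegolf/halve-the-falses.py | halve_zeroes
-- ===== SOURCE A (Python) =====
-- def halve_zeroes(a):
--     r = []
--     n = len(a)
--     i = 0
--     while i < n:
--         j = i
--         while j < n and a[i] == a[j]:
--             j += 1
--
--         k = j - i
--         if a[i] == 0:
--             k //= 2
--         for _ in range(k):
--             r.append(a[i])
--
--         i = j
--     return r
-- ===== SOURCE B (Python) =====
-- def halve_zeroes(a):
--     # Streaming filter: keep every element, except that only every second
--     # zero of a consecutive zero run is kept (a run of k zeros yields k//2).
--     r = []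
--     z = 0
--     for x in a:
--         if x == 0:
--             z += 1
--             if z % 2 == 0:
--                 r.append(x)
--         else:
--             z = 0
--             r.append(x)
--     return r
-- ===== Notes on version B (the rewrite author's own statement) =====
-- stated objective: simpler
-- what changed: Replaced run detection with replication (scan each run twice with two indices, halve zero-run lengths, emit replicate(k) copies) by a streaming filter that never computes run lengths: each element is visited once and kept or dropped on the spot, with a single zero-parity counter keeping every second zero of a zero run.
import Mathlib
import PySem

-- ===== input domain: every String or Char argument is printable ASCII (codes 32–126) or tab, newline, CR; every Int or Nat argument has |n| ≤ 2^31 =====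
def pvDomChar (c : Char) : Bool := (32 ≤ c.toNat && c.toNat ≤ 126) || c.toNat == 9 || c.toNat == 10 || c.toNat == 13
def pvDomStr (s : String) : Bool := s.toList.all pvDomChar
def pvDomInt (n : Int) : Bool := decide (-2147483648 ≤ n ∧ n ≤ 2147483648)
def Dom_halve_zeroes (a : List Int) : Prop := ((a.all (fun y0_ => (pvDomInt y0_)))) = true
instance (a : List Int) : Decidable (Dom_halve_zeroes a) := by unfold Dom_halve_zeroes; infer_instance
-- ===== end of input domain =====

-- B replaces A's run-detect-and-replicate scheme by a streaming filter with a
-- zero-parity counter that keeps every second zero of a zero run (objective: simpler).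

-- ===== PORT A =====
-- inner `while j < n and a[i] == a[j]: j += 1` (indices kept in range by the guard)
def hzScanA (a : List Int) (i j : Nat) : Nat :=
  if h : j < a.length ∧ a.getD j 0 == a.getD i 0 then hzScanA a i (j + 1) else j
termination_by a.length - j
decreasing_by omega

theorem hzScanA_le (a : List Int) (i j : Nat) : j ≤ hzScanA a i j := by
  unfold hzScanA
  split
  · exact Nat.le_trans (Nat.le_succ j) (hzScanA_le a i (j + 1))
  · exact Nat.le_refl j
termination_by a.length - j
decreasing_by rename_i h; omega

-- outer `while i < n` loop, accumulating r
def hzOuterA (a : List Int) (i : Nat) (r : List Int) : List Int :=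
  if h : i < a.length then
    let j := hzScanA a i i
    let k0 := j - i
    let k := if a.getD i 0 == 0 then k0 / 2 else k0
    hzOuterA a j (r ++ List.replicate k (a.getD i 0))
  else r
termination_by a.length - i
decreasing_by
  have h1 : i + 1 ≤ hzScanA a i (i + 1) := hzScanA_le a i (i + 1)
  have h2 : hzScanA a i i = hzScanA a i (i + 1) := by
    rw [hzScanA]; simp [h]
  omega

def halve_zeroes (a : List Int) : List Int := hzOuterA a 0 []

-- ===== PORT B =====
-- the `for x in a` loop carrying (r, z): keep x unless it is an odd-indexed zero of a zero run
def hzLoopB : List Int → Nat → List Int → List Int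
  | [], _, r => r
  | x :: xs, z, r =>
      if x == 0 then
        if (z + 1) % 2 == 0 then hzLoopB xs (z + 1) (r ++ [x])
        else hzLoopB xs (z + 1) r
      else hzLoopB xs 0 (r ++ [x])

def halve_zeroes_alt (a : List Int) : List Int := hzLoopB a 0 []

-- ===== PRECONDITION & SPEC =====
def Spec_halve_zeroes (a : List Int) (out : List Int) : Prop := out = halve_zeroes_alt a
instance (a : List Int) (out : List Int) : Decidable (Spec_halve_zeroes a out) := by unfold Spec_halve_zeroes; infer_instance

-- ===== CLAIM (what is proved, stated in full; the proofs are below) =====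
def Claim_equal_halve_zeroes : Prop := ∀ (a : List Int), Dom_halve_zeroes a → Spec_halve_zeroes a (halve_zeroes a)

-- ===== LEMMAS AND PROOFS =====

-- reference run-length function both ports are reduced to
def hzRuns : List Int → List Int
  | [] => []
  | x :: xs =>
      let k := (xs.takeWhile (· == x)).length + 1
      List.replicate (if x == 0 then k / 2 else k) x ++ hzRuns (xs.dropWhile (· == x))
termination_by l => l.length
decreasing_by
  simp only [List.length_cons]
  exact Nat.lt_succ_of_le (List.length_dropWhile_le _ _)

-- pure (accumulator-free) form of B's loop
def hzG : Nat → List Int → List Int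
  | _, [] => []
  | z, x :: xs =>
      if x == 0 then (if (z + 1) % 2 == 0 then [x] else []) ++ hzG (z + 1) xs
      else x :: hzG 0 xs

theorem hzLoopB_eq (l : List Int) : ∀ (z : Nat) (r : List Int),
    hzLoopB l z r = r ++ hzG z l := by
  induction l with
  | nil => intro z r; simp [hzLoopB, hzG]
  | cons x xs ih =>
    intro z r
    by_cases hx : x = 0
    · subst hx
      by_cases hz : (z + 1) % 2 = 0 <;> simp [hzLoopB, hzG, hz, ih]
    · simp [hzLoopB, hzG, hx, ih]

-- a zero run of length k entered with parity counter z emits the zeros at even counts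
theorem hzG_zero_run (k : Nat) : ∀ (z : Nat) (l : List Int),
    hzG z (List.replicate k 0 ++ l)
      = List.replicate ((z + k) / 2 - z / 2) (0 : Int) ++ hzG (z + k) l := by
  induction k with
  | zero => intro z l; simp
  | succ n ih =>
    intro z l
    rw [List.replicate_succ, List.cons_append, hzG]
    simp only [BEq.rfl, if_true]
    rw [ih (z + 1) l]
    have hcnt : (if (z + 1) % 2 == 0 then [(0 : Int)] else [])
        = List.replicate (if (z + 1) % 2 = 0 then 1 else 0) (0 : Int) := by
      by_cases h : (z + 1) % 2 = 0 <;> simp [h]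
    rw [hcnt, ← List.append_assoc, ← List.replicate_add]
    have harith : (if (z + 1) % 2 = 0 then 1 else 0) + ((z + 1 + n) / 2 - (z + 1) / 2)
        = (z + (n + 1)) / 2 - z / 2 := by
      by_cases h : (z + 1) % 2 = 0 <;> simp [h] <;> omega
    rw [harith]
    congr 2
    omega

-- a nonzero run passes through unchanged and resets the counter
theorem hzG_nonzero_run (k : Nat) {x : Int} (hx : x ≠ 0) : ∀ (z : Nat) (l : List Int),
    hzG z (List.replicate (k + 1) x ++ l) = List.replicate (k + 1) x ++ hzG 0 l := by
  induction k with
  | zero => intro z l; simp [hzG, hx]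
  | succ n ih =>
    intro z l
    rw [List.replicate_succ, List.cons_append, hzG]
    simp only [beq_iff_eq, hx, if_false]
    rw [ih 0 l, ← List.cons_append, ← List.replicate_succ]

-- after a run, the counter value is irrelevant (next element differs / list ends)
theorem hzG_reset (z : Nat) : ∀ (l : List Int), (∀ y ∈ l.head?, y ≠ 0) →
    hzG z l = hzG 0 l := by
  intro l hl
  cases l with
  | nil => rfl
  | cons y ys =>
    have hy : y ≠ 0 := hl y rfl
    simp [hzG, hy]

theorem hz_takeWhile_rep (x : Int) (l : List Int) :
    l.takeWhile (· == x) = List.replicate (l.takeWhile (· == x)).length x := by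
  apply List.eq_replicate_of_mem
  intro y hy
  have := List.mem_takeWhile_imp hy
  simpa using this

theorem hz_dropWhile_head (p : Int → Bool) (l : List Int) :
    ∀ y ∈ (l.dropWhile p).head?, p y = false := by
  induction l with
  | nil => intro y hy; simp at hy
  | cons x xs ih =>
    intro y hy
    rw [List.dropWhile_cons] at hy
    by_cases h : p x
    · exact ih y (by simpa [h] using hy)
    · simp [h] at hy
      simpa [hy] using h

theorem hzG_eq (l : List Int) : hzG 0 l = hzRuns l := by
  cases hl : l with
  | nil => simp [hzG, hzRuns]
  | cons x xs =>
    have hsplit : x :: xs = List.replicate ((xs.takeWhile (· == x)).length + 1) x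
        ++ xs.dropWhile (· == x) := by
      conv_lhs => rw [← List.takeWhile_append_dropWhile (p := (· == x)) (l := x :: xs)]
      rw [List.takeWhile_cons, List.dropWhile_cons]
      simp only [BEq.rfl, if_true]
      rw [List.replicate_succ, List.cons_append]
      congr 1
      exact congrArg (· ++ _) (hz_takeWhile_rep x xs)
    have hih : hzG 0 (xs.dropWhile (· == x)) = hzRuns (xs.dropWhile (· == x)) :=
      hzG_eq (xs.dropWhile (· == x))
    rw [hzRuns]
    conv_lhs => rw [hsplit]
    by_cases hx : x = 0
    · subst hx
      rw [hzG_zero_run]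
      have hdw : ∀ y ∈ ((xs.dropWhile (· == (0:Int))).head?), y ≠ 0 := by
        intro y hy
        have := hz_dropWhile_head (· == (0 : Int)) xs y hy
        simpa using this
      rw [hzG_reset _ _ hdw, hih]
      simp
    · rw [hzG_nonzero_run _ hx, hih]
      simp [hx]
termination_by l.length
decreasing_by
  simp only [hl, List.length_cons]
  exact Nat.lt_succ_of_le (List.length_dropWhile_le _ _)

theorem hzB_eq (a : List Int) : halve_zeroes_alt a = hzRuns a := by
  rw [halve_zeroes_alt, hzLoopB_eq, hzG_eq]
  simp

-- A side: characterise the inner scan via takeWhile on the dropped suffix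
theorem hzScanA_eq (a : List Int) (i : Nat) : ∀ (j : Nat), i ≤ j →
    hzScanA a i j = j + ((a.drop j).takeWhile (· == a.getD i 0)).length := by
  intro j hij
  rw [hzScanA]
  split
  · rename_i h
    obtain ⟨hj, hv⟩ := h
    have hdrop : a.drop j = a.getD j 0 :: a.drop (j + 1) := by
      rw [List.drop_eq_getElem_cons hj, List.getD_eq_getElem a 0 hj]
    have ih := hzScanA_eq a i (j + 1) (by omega)
    rw [ih, hdrop, List.takeWhile_cons]
    simp only [hv, if_true, List.length_cons]
    omega
  · rename_i h
    rcases Nat.lt_or_ge j a.length with hj | hj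
    · have hv : ¬ (a.getD j 0 == a.getD i 0) := by
        intro hv; exact h ⟨hj, hv⟩
      have hdrop : a.drop j = a.getD j 0 :: a.drop (j + 1) := by
        rw [List.drop_eq_getElem_cons hj, List.getD_eq_getElem a 0 hj]
      rw [hdrop, List.takeWhile_cons, if_neg hv]
      simp
    · rw [List.drop_eq_nil_of_le hj]
      simp
termination_by j => a.length - j
decreasing_by rename_i h _ _; omega

theorem hz_dropWhile_drop (p : Int → Bool) (l : List Int) :
    l.dropWhile p = l.drop (l.takeWhile p).length := by
  induction l with
  | nil => simp
  | cons x xs ih =>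
    rw [List.dropWhile_cons, List.takeWhile_cons]
    by_cases h : p x
    · simp [h, ih]
    · simp [h]

theorem hzOuterA_eq (a : List Int) : ∀ (i : Nat) (r : List Int),
    hzOuterA a i r = r ++ hzRuns (a.drop i) := by
  intro i r
  rw [hzOuterA]
  split
  · rename_i hi
    have hdrop : a.drop i = a.getD i 0 :: a.drop (i + 1) := by
      rw [List.drop_eq_getElem_cons hi, List.getD_eq_getElem a 0 hi]
    have hscan : hzScanA a i i = i + 1 + ((a.drop (i + 1)).takeWhile (· == a.getD i 0)).length := by
      have h1 : hzScanA a i i = hzScanA a i (i + 1) := by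
        rw [hzScanA]
        simp [hi]
      rw [h1, hzScanA_eq a i (i + 1) (by omega)]
    have ih := hzOuterA_eq a (hzScanA a i i)
      (r ++ List.replicate (if a.getD i 0 == 0 then (hzScanA a i i - i) / 2 else hzScanA a i i - i) (a.getD i 0))
    rw [ih]
    rw [List.append_assoc]
    congr 1
    have hdw : (a.drop (i + 1)).dropWhile (· == a.getD i 0) =
        a.drop (i + 1 + ((a.drop (i + 1)).takeWhile (· == a.getD i 0)).length) := by
      rw [hz_dropWhile_drop, List.drop_drop]
    conv_rhs => rw [hdrop, hzRuns]
    rw [hscan, hdw]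
    have harg : i + 1 + ((a.drop (i + 1)).takeWhile (· == a.getD i 0)).length - i
        = ((a.drop (i + 1)).takeWhile (· == a.getD i 0)).length + 1 := by omega
    rw [harg]
  · rename_i hi
    rw [List.drop_eq_nil_of_le (by omega)]
    simp [hzRuns]
termination_by i => a.length - i
decreasing_by
  rename_i hi
  have h1 : i + 1 ≤ hzScanA a i (i + 1) := hzScanA_le a i (i + 1)
  have h2 : hzScanA a i i = hzScanA a i (i + 1) := by
    rw [hzScanA]; simp [hi]
  omega

theorem hzA_eq (a : List Int) : halve_zeroes a = hzRuns a := by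
  rw [halve_zeroes, hzOuterA_eq]
  simp

-- ===== VERDICT (by name: the statement is the Claim_ definition above) =====
theorem halve_zeroes_spec : Claim_equal_halve_zeroes := by
  intro a _
  unfold Spec_halve_zeroes
  rw [hzA_eq, hzB_eq]
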